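-- pv_equiv track=rewrite | github.com/saman1000/exercises | string-practice.py | get_common_suffix
-- ===== SOURCE A (Python) =====
-- def get_common_suffix(strs):
--     if not strs:
--         return ""
--     shortest = min(strs, key=len)
--     max_counter = len(shortest)
--     index = 1
--     while index <= max_counter:
--         for str in strs:
--             if shortest[-index] != str[-index]:
--                 return shortest[len(shortest) - index + 1:]
--         index += 1
--     return shortest[len(shortest) - index + 1:]
-- ===== SOURCE B (Python) =====
-- def get_common_suffix(strs):
--     out = []
--     for chars in zip(*(reversed(s) for s in strs)):
--         if len(set(chars)) != 1:
--             break
--         out.append(chars[0])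
--     return "".join(reversed(out))
-- ===== Notes on version B (the rewrite author's own statement) =====
-- stated objective: idiomatic
-- what changed: Replaces the shortest-string search plus negative-index while/for scan and slice with a zip-transposed column pass over the reversed strings, collecting characters while each column is uniform and rejoining in reverse.
import Mathlib
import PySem

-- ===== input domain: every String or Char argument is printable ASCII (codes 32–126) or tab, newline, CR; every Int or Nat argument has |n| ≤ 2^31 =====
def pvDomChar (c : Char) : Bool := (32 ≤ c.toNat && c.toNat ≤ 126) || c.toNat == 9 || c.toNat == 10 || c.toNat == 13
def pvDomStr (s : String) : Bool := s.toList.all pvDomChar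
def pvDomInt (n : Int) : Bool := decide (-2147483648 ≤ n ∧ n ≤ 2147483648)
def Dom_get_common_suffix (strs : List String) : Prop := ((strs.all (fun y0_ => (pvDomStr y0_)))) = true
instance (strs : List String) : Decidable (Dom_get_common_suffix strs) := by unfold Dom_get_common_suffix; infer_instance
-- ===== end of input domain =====

-- B replaces A's shortest-string search plus negative-index while/for scan and slice by a
-- transposed column-wise pass over the reversed strings (idiomatic zip-style rewrite; same cost).

-- ===== PORT A =====
-- shortest[len(shortest) - index + 1:]
def pvASlice (shortest : List Char) (index : Nat) : List Char :=
  PySem.List.slice shortest (some ((shortest.length : Int) - (index : Int) + 1)) none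

-- the 'while index <= max_counter' loop; fuel = max_counter + 1 - index (remaining iterations);
-- the inner 'for str in strs' returns the slice at the current index on the first mismatch,
-- which is the same slice whichever str mismatches, hence List.any.
def pvALoop (strs : List (List Char)) (shortest : List Char) : Nat → Nat → List Char
  | 0, index => pvASlice shortest index
  | fuel + 1, index =>
    if strs.any (fun str =>
        PySem.List.pyGet? shortest (-(index : Int)) ≠ PySem.List.pyGet? str (-(index : Int))) then
      pvASlice shortest index
    else
      pvALoop strs shortest fuel (index + 1)

def get_common_suffix (strs : List String) : String :=
  if strs.isEmpty then "" else
  let shortest := PySem.List.minD strs (fun s => PySem.Str.len s) ""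
  let max_counter := shortest.toList.length
  String.ofList (pvALoop (strs.map String.toList) shortest.toList max_counter 1)

-- ===== PORT B =====
-- zip(*(reversed(s) for s in strs)): one column per suffix position, stopping at the first
-- exhausted string; the fuel (first string's length) only bounds the recursion depth.
def pvBCols : Nat → List (List Char) → List (List Char)
  | 0, _ => []
  | fuel + 1, ls =>
    if ls.all (fun l => !l.isEmpty) then
      ls.map (fun l => l.headD ' ') :: pvBCols fuel (ls.map List.tail)
    else []

-- the for loop: append chars[0] while len(set(chars)) == 1, break otherwise
def pvBLoop : List (List Char) → List Char → List Char
  | [], out => out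
  | c :: rest, out =>
    if PySem.Set.len (PySem.Set.ofList c) = 1 then pvBLoop rest (out ++ [c.headD ' '])
    else out

def get_common_suffix_alt (strs : List String) : String :=
  let cols := pvBCols (strs.headD "").toList.length (strs.map (fun s => s.toList.reverse))
  String.ofList (pvBLoop cols []).reverse

-- ===== PRECONDITION & SPEC =====
def Spec_get_common_suffix (strs : List String) (out : String) : Prop := out = get_common_suffix_alt strs
instance (strs : List String) (out : String) : Decidable (Spec_get_common_suffix strs out) := by unfold Spec_get_common_suffix; infer_instance

-- ===== CLAIM (what is proved, stated in full; the proofs are below) =====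
def Claim_equal_get_common_suffix : Prop := ∀ (strs : List String), Dom_get_common_suffix strs → Spec_get_common_suffix strs (get_common_suffix strs)

-- ===== LEMMAS AND PROOFS =====

-- the slice at index j+1 is the last j characters, i.e. reverse of the first j of the reverse
lemma pvASlice_eq (sh : List Char) (j : Nat) (hj : j ≤ sh.length) :
    pvASlice sh (j + 1) = (sh.reverse.take j).reverse := by
  unfold pvASlice
  have h1 : ((sh.length : Int) - (((j + 1 : Nat)) : Int) + 1) = ((sh.length - j : Nat) : Int) := by
    push_cast; omega
  rw [h1, PySem.List.slice_from _ (by positivity)]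
  rw [List.take_reverse, List.reverse_reverse, Int.toNat_natCast]

-- shortest[-(j+1)] is the j-th character of the reversal
lemma pvGet_neg (l : List Char) (j : Nat) (hj : j < l.length) :
    PySem.List.pyGet? l (-(((j : Nat) + 1 : Nat) : Int)) = l.reverse[j]? := by
  simp only [PySem.List.pyGet?, PySem.List.pyIdx?]
  rw [if_neg (by push_cast; omega), if_pos (by push_cast; omega)]
  rw [List.getElem?_reverse hj]
  have h2 : ((-(-(((j : Nat) + 1 : Nat) : Int))).toNat) = j + 1 := by push_cast; omega
  simp only [h2, Option.bind_some]
  congr 1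
  omega

-- helper for pvSetLenOne: adding copies of x to {x} changes nothing
lemma pvFoldlAddSelf {α : Type} [BEq α] [LawfulBEq α] (x : α) (t : List α)
    (h : ∀ y ∈ t, y = x) : t.foldl PySem.Set.add [x] = [x] := by
  induction t with
  | nil => rfl
  | cons y t ih =>
    have hy : y = x := h y (by simp)
    subst hy
    have hadd : PySem.Set.add [y] y = [y] := by simp [PySem.Set.add]
    rw [List.foldl_cons, hadd]
    exact ih (fun z hz => h z (by simp [hz]))

-- len(set(x :: t)) == 1 iff every element of t equals x
lemma pvSetLenOne {α : Type} [BEq α] [LawfulBEq α] (x : α) (t : List α) :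
    PySem.Set.len (PySem.Set.ofList (x :: t)) = 1 ↔ ∀ y ∈ t, y = x := by
  constructor
  · intro h y hy
    have hx : x ∈ PySem.Set.ofList (x :: t) := (PySem.Set.mem_ofList _ _).2 (by simp)
    have hy' : y ∈ PySem.Set.ofList (x :: t) := (PySem.Set.mem_ofList _ _).2 (by simp [hy])
    have hlen : (PySem.Set.ofList (x :: t)).length = 1 := by
      simpa [PySem.Set.len] using h
    match hs : PySem.Set.ofList (x :: t) with
    | [z] =>
      rw [hs] at hx hy'
      simp at hx hy'
      rw [hy', hx]
    | [] => rw [hs] at hlen; simp at hlen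
    | a :: b :: r => rw [hs] at hlen; simp at hlen
  · intro h
    have : PySem.Set.ofList (x :: t) = [x] := by
      simp only [PySem.Set.ofList, List.foldl_cons]
      have : PySem.Set.add PySem.Set.empty x = [x] := rfl
      rw [this]
      exact pvFoldlAddSelf x t h
    rw [this]
    rfl

-- accumulator lemma for B's loop
lemma pvBLoop_acc (cols : List (List Char)) (out : List Char) :
    pvBLoop cols out = out ++ pvBLoop cols [] := by
  induction cols generalizing out with
  | nil => simp [pvBLoop]
  | cons c rest ih =>
    simp only [pvBLoop]
    split
    · rw [ih (out ++ [c.headD ' ']), ih ([] ++ [c.headD ' '])]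
      simp
    · simp

-- the bridge: at suffix position j, A's remaining while loop agrees with B's remaining columns
lemma pvBridge (L : List (List Char)) (sh : List Char)
    (hmem : sh ∈ L) (hmin : ∀ l ∈ L, sh.length ≤ l.length) :
    ∀ (fuelB j : Nat), j ≤ sh.length → sh.length - j ≤ fuelB →
    pvALoop L sh (sh.length - j) (j + 1) =
      (sh.reverse.take j ++
        pvBLoop (pvBCols fuelB (L.map (fun l => l.reverse.drop j))) []).reverse := by
  intro fuelB
  induction fuelB generalizing L sh with
  | zero =>
    intro j hj hfuel
    have hje : j = sh.length := by omega
    have h0 : sh.length - j = 0 := by omega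
    rw [h0]
    simp only [pvALoop, pvBCols, pvBLoop, List.append_nil]
    rw [pvASlice_eq sh j hj]
  | succ fuelB ih =>
    intro j hj hfuel
    by_cases hjm : j = sh.length
    · have h0 : sh.length - j = 0 := by omega
      rw [h0]
      have hempty : ¬ ((L.map (fun l => l.reverse.drop j)).all (fun l => !l.isEmpty) = true) := by
        simp only [List.all_map, List.all_eq_true]
        intro hall
        have := hall sh hmem
        subst hjm
        simp at this
      simp only [pvALoop, pvBCols, if_neg hempty, pvBLoop, List.append_nil]
      rw [pvASlice_eq sh j hj]
    · have hj' : j < sh.length := lt_of_le_of_ne hj hjm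
      obtain ⟨l0, L', rfl⟩ : ∃ l0 L', L = l0 :: L' := by
        cases L with
        | nil => cases hmem
        | cons a b => exact ⟨a, b, rfl⟩
      have hstep : sh.length - j = (sh.length - (j + 1)) + 1 := by omega
      rw [hstep]
      -- characterize the gets
      have hget : ∀ l ∈ (l0 :: L'), PySem.List.pyGet? l (-(((j + 1 : Nat)) : Int)) = some (l.reverse.getD j ' ') := by
        intro l hl
        have hjl : j < l.length := lt_of_lt_of_le hj' (hmin l hl)
        rw [pvGet_neg l j hjl, List.getElem?_eq_getElem (by simpa using hjl),
            List.getD_eq_getElem l.reverse ' ' (by simpa using hjl)]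
      -- B's guard is true
      have hne : (((l0 :: L').map (fun l => l.reverse.drop j)).all (fun l => !l.isEmpty) = true) := by
        simp only [List.all_map, List.all_eq_true]
        intro l hl
        have hjl : j < l.length := lt_of_lt_of_le hj' (hmin l hl)
        simp [List.drop_eq_nil_iff]
        omega
      -- the column
      have hcolD : ∀ l ∈ (l0 :: L'), ((l.reverse.drop j).headD ' ') = l.reverse.getD j ' ' := by
        intro l hl
        rw [List.headD_eq_head?_getD, List.head?_drop, List.getD_eq_getElem?_getD]
      simp only [pvALoop, pvBCols, if_pos hne, List.map_map, Function.comp_def]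
      have htail : ((fun l => (l.reverse.drop j).tail) : List Char → List Char)
          = fun l => l.reverse.drop (j + 1) := by
        funext l; exact List.tail_drop
      -- A's mismatch test vs the column's set
      by_cases hmis : ∃ l ∈ (l0 :: L'), l.reverse.getD j ' ' ≠ sh.reverse.getD j ' '
      · -- mismatch: both stop here
        have hany : ((l0 :: L').any (fun str =>
            PySem.List.pyGet? sh (-(((j + 1 : Nat)) : Int)) ≠
              PySem.List.pyGet? str (-(((j + 1 : Nat)) : Int))) = true) := by
          obtain ⟨l, hl, hne'⟩ := hmis
          rw [List.any_eq_true]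
          exact ⟨l, hl, by rw [hget l hl, hget sh hmem]; simp; exact fun h => hne' h.symm⟩
        rw [if_pos hany]
        have hnotone : ¬ (PySem.Set.len (PySem.Set.ofList
            (((l0 :: L').map (fun l => (l.reverse.drop j).headD ' ')))) = 1) := by
          simp only [List.map_cons]
          rw [pvSetLenOne]
          intro hall
          obtain ⟨l, hl, hne'⟩ := hmis
          have heq : ∀ l' ∈ (l0 :: L'), (l'.reverse.drop j).headD ' ' = (l0.reverse.drop j).headD ' ' := by
            intro l' hl'
            rcases (by simpa using hl' : l' = l0 ∨ l' ∈ L') with h | h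
            · rw [h]
            · exact hall _ (List.mem_map_of_mem h)
          have h1 := heq l hl
          have h2 := heq sh hmem
          rw [hcolD l hl] at h1
          rw [hcolD sh hmem] at h2
          exact hne' (h1.trans h2.symm)
        simp only [pvBLoop]
        rw [if_neg hnotone, pvASlice_eq sh j hj]
        simp
      · -- all agree: advance one position on both sides
        push Not at hmis
        have hany : ¬ ((l0 :: L').any (fun str =>
            PySem.List.pyGet? sh (-(((j + 1 : Nat)) : Int)) ≠
              PySem.List.pyGet? str (-(((j + 1 : Nat)) : Int))) = true) := by
          rw [List.any_eq_true]
          rintro ⟨l, hl, hne'⟩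
          rw [hget l hl, hget sh hmem] at hne'
          exact (by simpa using hne' : sh.reverse.getD j ' ' ≠ l.reverse.getD j ' ')
            (hmis l hl).symm
        rw [if_neg hany]
        have hone : (PySem.Set.len (PySem.Set.ofList
            (((l0 :: L').map (fun l => (l.reverse.drop j).headD ' ')))) = 1) := by
          simp only [List.map_cons]
          rw [pvSetLenOne]
          intro y hy
          obtain ⟨l, hl, rfl⟩ := List.mem_map.1 hy
          rw [hcolD l (by simp [hl]), hcolD l0 (by simp)]
          rw [hmis l (by simp [hl]), hmis l0 (by simp)]
        simp only [pvBLoop]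
        rw [if_pos hone]
        simp only [List.nil_append]
        rw [pvBLoop_acc _ [((l0 :: L').map (fun l => (l.reverse.drop j).headD ' ')).headD ' ']]
        rw [htail]
        have ihx := ih (l0 :: L') sh hmem hmin (j + 1) (by omega) (by omega)
        rw [ihx]
        have hhead : (((l0 :: L').map (fun l => (l.reverse.drop j).headD ' ')).headD ' ')
            = sh.reverse.getD j ' ' := by
          simp only [List.map_cons, List.headD_cons]
          rw [hcolD l0 (by simp)]
          exact hmis l0 (by simp)
        rw [hhead]
        have htake : sh.reverse.take (j + 1) = sh.reverse.take j ++ [sh.reverse.getD j ' '] := by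
          rw [List.take_add_one]
          congr 1
          rw [List.getElem?_eq_getElem (by simpa using hj'),
              List.getD_eq_getElem sh.reverse ' ' (by simpa using hj')]
          rfl
        rw [htake]
        simp

-- ===== VERDICT (by name: the statement is the Claim_ definition above) =====
theorem get_common_suffix_spec : Claim_equal_get_common_suffix := by
  intro strs _
  unfold Spec_get_common_suffix
  cases strs with
  | nil => decide
  | cons s0 rest =>
    obtain ⟨m, hm⟩ : ∃ m, PySem.List.min? (s0 :: rest) (fun s => PySem.Str.len s) = some m := by
      cases h : PySem.List.min? (s0 :: rest) (fun s => PySem.Str.len s) with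
      | none => exact absurd ((PySem.List.min?_eq_none_iff _ _).1 h) (by simp)
      | some m => exact ⟨m, rfl⟩
    have hmemS : m ∈ s0 :: rest := PySem.List.min?_mem hm
    have hminS : ∀ y ∈ s0 :: rest, PySem.Str.len m ≤ PySem.Str.len y := PySem.List.min?_isMin hm
    have hmem : m.toList ∈ (s0 :: rest).map String.toList := List.mem_map_of_mem hmemS
    have hmin : ∀ l ∈ (s0 :: rest).map String.toList, m.toList.length ≤ l.length := by
      intro l hl
      obtain ⟨y, hy, rfl⟩ := List.mem_map.1 hl
      have := hminS y hy
      simp only [PySem.Str.len_eq] at this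
      exact_mod_cast this
    have hb := pvBridge ((s0 :: rest).map String.toList) m.toList hmem hmin
      s0.toList.length 0 (Nat.zero_le _) (by
        have := hmin s0.toList (by simp)
        omega)
    simp only [Nat.sub_zero, List.drop_zero, List.take_zero, List.nil_append] at hb
    unfold get_common_suffix get_common_suffix_alt
    simp only [List.isEmpty_cons, Bool.false_eq_true, if_false, List.headD_cons]
    rw [PySem.List.minD, hm, Option.getD_some, hb]
    congr 2
    simp [List.map_map, Function.comp_def]
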